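-- pv_equiv track=rewrite | github.com/pypi-data/pypi-mirror-82 | packages/tacitpy/tacitpy-0.1.1-py3-none-any.whl/tacitpy/__init__.py | _lex_annotation
-- ===== SOURCE A (Python) =====
-- def _match_t_type(rest):
--     if len(rest) == 0:
--         return None
--
--     len2 = {
--         '->': 'MAPPING'
--     }.get(rest[:2])
--
--     len1 = {
--         ',': 'COMMA',
--         '[': 'L_BRACKET',
--         ']': 'R_BRACKET',
--         '(': 'L_PAREN',
--         ')': 'R_PAREN'
--     }.get(rest[:1])
--
--     if len2 is not None:
--         return (rest[:2], len2)
--     if len1 is not None: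
--         return (rest[:1], len1)
--     if rest[0] == ' ':
--         return None
--
--     return 'IDENT'
--
-- def _lex_annotation(type_string):
--     if len(type_string) == 0:
--         return None
--
--     offset = 0
--
--     tt = _match_t_type(type_string)
--     while tt is None:
--         offset += 1
--         type_string = type_string[1:]
--         if len(type_string) == 0:
--             return None
--         tt = _match_t_type(type_string)
--
--     if tt != 'IDENT':
--         offset += len(tt[0])
--         return (tt[0], tt[1], offset)
--
--     old_tt = tt
--     span = 0
--
--     while tt == old_tt:
--         span += 1;
--         old_tt = _match_t_type(type_string[span:])
--
--     sub = type_string[:span]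
--     return (sub, 'IDENT', offset + span)
-- ===== SOURCE B (Python) =====
-- _PUNCT = {
--     ',': 'COMMA',
--     '[': 'L_BRACKET',
--     ']': 'R_BRACKET',
--     '(': 'L_PAREN',
--     ')': 'R_PAREN'
-- }
--
-- def _lex_annotation(type_string):
--     stripped = type_string.lstrip(' ')
--     if not stripped:
--         return None
--     offset = len(type_string) - len(stripped)
--     if stripped.startswith('->'):
--         return ('->', 'MAPPING', offset + 2)
--     c = stripped[0]
--     if c in _PUNCT:
--         return (c, _PUNCT[c], offset + 1)
--     span = 1
--     while span < len(stripped):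
--         ch = stripped[span]
--         if ch == ' ' or ch in _PUNCT or stripped.startswith('->', span):
--             break
--         span += 1
--     return (stripped[:span], 'IDENT', offset + span)
-- ===== Notes on version B (the rewrite author's own statement) =====
-- stated objective: simpler
-- what changed: A repeatedly re-slices the string and re-runs a three-way token-classifier helper inside both of its loops; B drops the helper entirely and lexes directly: a space lstrip for the skip, a startswith/dict check on the head for the two-char and one-char tokens, and a single forward index scan for the identifier span.
import Mathlib
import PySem

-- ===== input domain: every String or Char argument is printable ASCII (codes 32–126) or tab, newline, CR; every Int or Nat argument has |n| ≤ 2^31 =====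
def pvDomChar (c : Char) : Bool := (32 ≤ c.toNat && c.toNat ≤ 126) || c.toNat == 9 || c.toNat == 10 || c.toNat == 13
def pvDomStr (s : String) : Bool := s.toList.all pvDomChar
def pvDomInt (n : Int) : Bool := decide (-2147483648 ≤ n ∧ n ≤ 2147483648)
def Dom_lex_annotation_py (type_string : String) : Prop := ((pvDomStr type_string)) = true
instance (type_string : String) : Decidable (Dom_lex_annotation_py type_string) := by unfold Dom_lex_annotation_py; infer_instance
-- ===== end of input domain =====

-- B replaces A's repeated-rescan helper lexer by lstrip + startswith + one forward scan (simpler, one pass; A re-slices the string each step).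

-- ===== PORT A =====
-- result of _match_t_type: None | 'IDENT' | (token, type)
inductive PvTT
  | mnone
  | mident
  | mtok : String → String → PvTT
deriving DecidableEq

def pvMatchTT (rest : List Char) : PvTT :=
  if rest.length = 0 then .mnone
  else
    -- dict {'->': 'MAPPING'}.get(rest[:2])
    let len2 : Option String := if rest.take 2 = ['-', '>'] then some "MAPPING" else none
    -- dict of single-char tokens .get(rest[:1])
    let len1 : Option String :=
      if rest.take 1 = [','] then some "COMMA"
      else if rest.take 1 = ['['] then some "L_BRACKET"
      else if rest.take 1 = [']'] then some "R_BRACKET"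
      else if rest.take 1 = ['('] then some "L_PAREN"
      else if rest.take 1 = [')'] then some "R_PAREN"
      else none
    match len2 with
    | some t => .mtok (String.ofList (rest.take 2)) t
    | none =>
      match len1 with
      | some t => .mtok (String.ofList (rest.take 1)) t
      | none => if rest.headI = ' ' then .mnone else .mident

lemma pvMatchTT_mident_ne_nil {r : List Char} (h : pvMatchTT r = .mident) : r ≠ [] := by
  intro e; subst e; simp [pvMatchTT] at h

-- the second while loop of A: span += 1; old_tt = _match_t_type(type_string[span:])
def pvIdentLoopA (ts : List Char) (span : Nat) : Nat :=
  if h : pvMatchTT (ts.drop (span + 1)) = .mident then pvIdentLoopA ts (span + 1)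
  else span + 1
termination_by ts.length - span
decreasing_by
  have hne := pvMatchTT_mident_ne_nil h
  have : span + 1 < ts.length := by
    by_contra hc
    exact hne (List.drop_eq_nil_of_le (by omega))
  omega

-- the first while loop of A (skip leading spaces), with the tail of the function inlined as the loop exit
def pvSkipLoopA (ts : List Char) (offset : Int) : Option (String × String × Int) :=
  match pvMatchTT ts with
  | .mnone =>
      let ts' := ts.drop 1
      if h : ts'.length = 0 then none else pvSkipLoopA ts' (offset + 1)
  | .mtok s t => some (s, t, offset + (s.length : Int))
  | .mident =>
      let span := pvIdentLoopA ts 0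
      some (String.ofList (ts.take span), "IDENT", offset + (span : Int))
termination_by ts.length
decreasing_by
  simp [ts'] at h ⊢
  omega

def lex_annotation_py (type_string : String) : Option (String × String × Int) :=
  let ts := type_string.toList
  if ts.length = 0 then none else pvSkipLoopA ts 0

-- ===== PORT B =====
-- the module-level dict _PUNCT of Source B (membership/lookup)
def pvPunct (c : Char) : Option String :=
  if c = ',' then some "COMMA"
  else if c = '[' then some "L_BRACKET"
  else if c = ']' then some "R_BRACKET"
  else if c = '(' then some "L_PAREN"
  else if c = ')' then some "R_PAREN"
  else none

-- the single forward scan of Source B's while loop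
def pvScanB (st : List Char) (span : Nat) : Nat :=
  if h : span < st.length then
    let ch := st.get ⟨span, h⟩
    if ch = ' ' ∨ (pvPunct ch).isSome ∨ (st.drop span).take 2 = ['-', '>'] then span
    else pvScanB st (span + 1)
  else span
termination_by st.length - span

def lex_annotation_py_alt (type_string : String) : Option (String × String × Int) :=
  let ts := type_string.toList
  let stripped := ts.dropWhile (· = ' ')          -- lstrip(' ')
  match stripped with
  | [] => none
  | c :: _ =>
    let offset : Int := (ts.length : Int) - (stripped.length : Int)
    if stripped.take 2 = ['-', '>'] then some ("->", "MAPPING", offset + 2)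
    else
      match pvPunct c with
      | some t => some (String.ofList [c], t, offset + 1)
      | none =>
        let span := pvScanB stripped 1
        some (String.ofList (stripped.take span), "IDENT", offset + (span : Int))

-- ===== PRECONDITION & SPEC =====
def Spec_lex_annotation_py (type_string : String) (out : Option (String × String × Int)) : Prop := out = lex_annotation_py_alt type_string
instance (type_string : String) (out : Option (String × String × Int)) : Decidable (Spec_lex_annotation_py type_string out) := by unfold Spec_lex_annotation_py; infer_instance

-- ===== CLAIM (what is proved, stated in full; the proofs are below) =====
def Claim_equal_lex_annotation_py : Prop := ∀ (type_string : String), Dom_lex_annotation_py type_string → Spec_lex_annotation_py type_string (lex_annotation_py type_string)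

-- ===== LEMMAS AND PROOFS =====

def pvCore (stripped : List Char) (offset : Int) : Option (String × String × Int) :=
  match stripped with
  | [] => none
  | c :: _ =>
    if stripped.take 2 = ['-', '>'] then some ("->", "MAPPING", offset + 2)
    else
      match pvPunct c with
      | some t => some (String.ofList [c], t, offset + 1)
      | none =>
        some (String.ofList (stripped.take (pvScanB stripped 1)), "IDENT", offset + ((pvScanB stripped 1 : Nat) : Int))

lemma pvMatchTT_cons (c : Char) (r : List Char) :
    pvMatchTT (c :: r) =
      if (c :: r).take 2 = ['-', '>'] then .mtok "->" "MAPPING"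
      else match pvPunct c with
        | some t => .mtok (String.ofList [c]) t
        | none => if c = ' ' then .mnone else .mident := by
  by_cases h1 : (c :: r).take 2 = ['-', '>']
  · rw [pvMatchTT]
    simp [h1]
  · rw [pvMatchTT]
    simp only [List.length_cons, List.take_succ_cons, List.take_zero,       Nat.succ_ne_zero, if_false, List.cons.injEq, and_true, List.headI, pvPunct]
    split_ifs <;> simp_all

lemma pvMident_iff (c : Char) (r : List Char) :
    pvMatchTT (c :: r) = .mident ↔ (c ≠ ' ' ∧ pvPunct c = none ∧ (c :: r).take 2 ≠ ['-', '>']) := by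
  rw [pvMatchTT_cons]
  cases hpn : pvPunct c <;> split_ifs <;> simp_all

lemma pvLoop_eq (st : List Char) : ∀ span : Nat, pvIdentLoopA st span = pvScanB st (span + 1) := by
  have key : ∀ n span, st.length - span ≤ n → pvIdentLoopA st span = pvScanB st (span + 1) := by
    intro n
    induction n with
    | zero =>
      intro span hle
      have hnil : st.drop (span + 1) = [] := List.drop_eq_nil_of_le (by omega)
      rw [pvIdentLoopA, pvScanB]
      simp [hnil, pvMatchTT]
      omega
    | succ n ih =>
      intro span hle
      rw [pvIdentLoopA, pvScanB]
      by_cases hlt : span + 1 < st.length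
      · have hd : st.drop (span + 1) = st[span + 1] :: st.drop (span + 2) :=
          List.drop_eq_getElem_cons hlt
        by_cases hm : pvMatchTT (st.drop (span + 1)) = .mident
        · rw [dif_pos hm, dif_pos hlt]
          have hm' := hm
          rw [hd, pvMident_iff] at hm'
          obtain ⟨h1, h2, h3⟩ := hm'
          rw [if_neg]
          · exact ih (span + 1) (by omega)
          · simp only [List.get_eq_getElem, hd, h2, not_or]
            exact ⟨h1, by simp, h3⟩
        · rw [dif_neg hm, dif_pos hlt, if_pos]
          rw [hd, pvMident_iff] at hm
          simp only [not_and_or, not_not] at hm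
          simp only [List.get_eq_getElem, hd]
          rcases hm with h | h | h
          · exact Or.inl h
          · exact Or.inr (Or.inl (Option.ne_none_iff_isSome.mp h))
          · exact Or.inr (Or.inr h)
      · have hnil : st.drop (span + 1) = [] := List.drop_eq_nil_of_le (by omega)
        simp [hnil, pvMatchTT, hlt]
  intro span
  exact key _ span le_rfl

lemma pvSkip_eq : ∀ (ts : List Char) (offset : Int), ts ≠ [] →
    pvSkipLoopA ts offset =
      pvCore (ts.dropWhile (· = ' '))
        (offset + ((ts.length - (ts.dropWhile (· = ' ')).length : Nat) : Int)) := by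
  intro ts
  induction ts with
  | nil => simp
  | cons c r ih =>
    intro offset _
    by_cases hc : c = ' '
    · subst hc
      have hm : pvMatchTT (' ' :: r) = .mnone := by
        rw [pvMatchTT_cons]; simp [pvPunct]
      rw [pvSkipLoopA, hm]
      have hdw : (' ' :: r).dropWhile (· = ' ') = r.dropWhile (· = ' ') := by
        simp
      rw [hdw]
      by_cases hr : r = []
      · subst hr
        simp [pvCore]
      · have hlen : ¬ r.length = 0 := by simp [List.length_eq_zero_iff, hr]
        simp only [List.drop_succ_cons, List.drop_zero]
        rw [dif_neg hlen, ih (offset + 1) hr]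
        congr 1
        have h2 : (r.dropWhile (fun c => decide (c = ' '))).length ≤ r.length :=
          List.length_dropWhile_le (fun c => decide (c = ' ')) r
        push_cast [List.length_cons]
        omega
    · have hdw : (c :: r).dropWhile (· = ' ') = c :: r :=
        List.dropWhile_cons_of_neg (by simp [hc])
      rw [pvSkipLoopA, pvMatchTT_cons, hdw]
      have hoff : offset + (((c :: r).length - (c :: r).length : Nat) : Int) = offset := by simp
      by_cases h2 : (c :: r).take 2 = ['-', '>']
      · simp only [pvCore, hoff, h2]
        have hl : ("->" : String).length = 2 := by decide
        simp [hl]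
      · rw [if_neg h2]
        cases hp : pvPunct c with
        | some t =>
          simp only [pvCore, hoff, if_neg h2, hp]
          simp
        | none =>
          simp only [pvCore, hoff, if_neg h2, hp]
          rw [pvLoop_eq]
          simp [hc]

lemma pvAlt_eq (s : String) :
    lex_annotation_py_alt s =
      pvCore (s.toList.dropWhile (· = ' '))
        ((s.toList.length : Int) - ((s.toList.dropWhile (· = ' ')).length : Int)) := by
  unfold lex_annotation_py_alt pvCore
  cases h : s.toList.dropWhile (· = ' ') with
  | nil => simp [h]
  | cons c rest => simp [h]

-- ===== VERDICT (by name: the statement is the Claim_ definition above) =====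
theorem lex_annotation_py_spec : Claim_equal_lex_annotation_py := by
  intro s _
  unfold Spec_lex_annotation_py lex_annotation_py
  rw [pvAlt_eq]
  by_cases h : s.toList.length = 0
  · have hnil : s.toList = [] := List.length_eq_zero_iff.mp h
    simp [hnil, pvCore]
  · rw [if_neg h, pvSkip_eq _ 0 (by simpa [List.length_eq_zero_iff] using h)]
    congr 1
    have h2 : (s.toList.dropWhile (fun c => decide (c = ' '))).length ≤ s.toList.length :=
      List.length_dropWhile_le _ _
    omega
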